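-- pv_equiv track=rewrite | github.com/cjlangan/noncrossing_trees | enumeration/finite_search.py | rotated_versions
-- ===== SOURCE A (Python) =====
-- def rotated_versions(tree: list[tuple[int, int]]) -> list[frozenset[tuple[int, int]]]:
--     """get all rotated versions of the initial tree"""
--     n = len(tree) + 1
--     return [
--         frozenset(
--             (min((a + r) % n, (b + r) % n), max((a + r) % n, (b + r) % n))
--             for a, b in tree
--         )
--         for r in range(n)
--     ]
-- ===== SOURCE B (Python) =====
-- def rotated_versions(tree: list[tuple[int, int]]) -> list[frozenset[tuple[int, int]]]:
--     """get all rotated versions of the initial tree"""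
--     n = len(tree) + 1
--     cur = frozenset((min(a % n, b % n), max(a % n, b % n)) for a, b in tree)
--     out = [cur]
--     for _ in range(n - 1):
--         cur = frozenset(
--             (min((x + 1) % n, (y + 1) % n), max((x + 1) % n, (y + 1) % n))
--             for x, y in cur
--         )
--         out.append(cur)
--     return out
-- ===== Notes on version B (the rewrite author's own statement) =====
-- stated objective: alternative
-- what changed: A recomputes every edge from the original tree for each shift r with (a+r)%n; B normalises the tree once into rotation 0 and then derives each rotation incrementally from the previous frozenset by shifting every stored edge by 1 mod n, appending n-1 times.
import Mathlib
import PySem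

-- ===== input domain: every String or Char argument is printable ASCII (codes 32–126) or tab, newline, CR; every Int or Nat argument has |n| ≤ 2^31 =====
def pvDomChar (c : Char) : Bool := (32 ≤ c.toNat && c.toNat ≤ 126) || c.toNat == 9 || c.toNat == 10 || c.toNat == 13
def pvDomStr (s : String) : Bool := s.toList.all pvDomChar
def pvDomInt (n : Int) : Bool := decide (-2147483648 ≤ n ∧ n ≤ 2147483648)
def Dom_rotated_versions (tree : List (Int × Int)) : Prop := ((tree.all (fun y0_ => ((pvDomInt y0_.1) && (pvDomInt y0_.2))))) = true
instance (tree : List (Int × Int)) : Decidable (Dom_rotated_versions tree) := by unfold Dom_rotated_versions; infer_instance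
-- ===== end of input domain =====

-- B replaces A's recomputation of every edge from scratch for each shift r by an
-- incremental pass that derives each rotation from the previous one (objective: alternative).

-- ===== PORT A =====
def rotated_versions (tree : List (Int × Int)) : List (List (Int × Int)) :=
  let n : Int := (tree.length : Int) + 1
  (PySem.List.pyRange 0 n 1).map (fun r =>
    PySem.Set.ofList (tree.map (fun ab =>
      (min (PySem.Int.mod (ab.1 + r) n) (PySem.Int.mod (ab.2 + r) n),
       max (PySem.Int.mod (ab.1 + r) n) (PySem.Int.mod (ab.2 + r) n)))))

-- ===== PORT B =====
def pvRotStep (n : Int) (s : List (Int × Int)) : List (Int × Int) :=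
  PySem.Set.ofList (s.map (fun xy =>
    (min (PySem.Int.mod (xy.1 + 1) n) (PySem.Int.mod (xy.2 + 1) n),
     max (PySem.Int.mod (xy.1 + 1) n) (PySem.Int.mod (xy.2 + 1) n))))

def rotated_versions_alt (tree : List (Int × Int)) : List (List (Int × Int)) :=
  let n : Int := (tree.length : Int) + 1
  let cur0 : List (Int × Int) := PySem.Set.ofList (tree.map (fun ab =>
    (min (PySem.Int.mod ab.1 n) (PySem.Int.mod ab.2 n),
     max (PySem.Int.mod ab.1 n) (PySem.Int.mod ab.2 n))))
  ((List.range tree.length).foldl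
    (fun st _ => let nxt := pvRotStep n st.2; (st.1 ++ [nxt], nxt))
    ([cur0], cur0)).1

-- ===== PRECONDITION & SPEC =====
def Spec_rotated_versions (tree : List (Int × Int)) (out : List (List (Int × Int))) : Prop := out = rotated_versions_alt tree
instance (tree : List (Int × Int)) (out : List (List (Int × Int))) : Decidable (Spec_rotated_versions tree out) := by unfold Spec_rotated_versions; infer_instance

-- ===== CLAIM (what is proved, stated in full; the proofs are below) =====
def Claim_equal_rotated_versions : Prop := ∀ (tree : List (Int × Int)), Dom_rotated_versions tree → Spec_rotated_versions tree (rotated_versions tree)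

-- ===== LEMMAS AND PROOFS =====

-- the normalised edge set of rotation r (proof-only abbreviation)
def pvF (n : Int) (tree : List (Int × Int)) (r : Int) : List (Int × Int) :=
  PySem.Set.ofList (tree.map (fun ab =>
    (min (PySem.Int.mod (ab.1 + r) n) (PySem.Int.mod (ab.2 + r) n),
     max (PySem.Int.mod (ab.1 + r) n) (PySem.Int.mod (ab.2 + r) n))))

-- the first k rotations, as a list (proof-only abbreviation)
def pvOuts (n : Int) (tree : List (Int × Int)) (k : Nat) : List (List (Int × Int)) :=
  List.map (fun (j : Nat) => pvF n tree (Int.ofNat j)) (List.range k)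

theorem pv_ofList_snoc {α : Type} [BEq α] (l : List α) (x : α) :
    PySem.Set.ofList (l ++ [x]) = PySem.Set.add (PySem.Set.ofList l) x := by
  rw [PySem.Set.ofList_eq_foldl, PySem.Set.ofList_eq_foldl, List.foldl_append]
  rfl

theorem pv_add_mem {α : Type} [BEq α] [LawfulBEq α] (s : PySem.Set α) (x : α) (h : x ∈ s) :
    PySem.Set.add s x = s := by
  simp [PySem.Set.add, PySem.Set.contains, h]

theorem pv_add_not_mem {α : Type} [BEq α] [LawfulBEq α] (s : PySem.Set α) (x : α) (h : ¬ x ∈ s) :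
    PySem.Set.add s x = s ++ [x] := by
  simp [PySem.Set.add, PySem.Set.contains, h]

theorem pv_ofList_map_ofList {α β : Type} [BEq α] [LawfulBEq α] [BEq β] [LawfulBEq β]
    (g : α → β) (l : List α) :
    PySem.Set.ofList (List.map g (PySem.Set.ofList l)) = PySem.Set.ofList (List.map g l) := by
  induction l using List.reverseRecOn with
  | nil => rfl
  | append_singleton l x ih =>
    rw [List.map_append, List.map_singleton, pv_ofList_snoc (List.map g l) (g x),
        pv_ofList_snoc l x]
    by_cases hx : x ∈ PySem.Set.ofList l
    · rw [pv_add_mem _ _ hx, ih, pv_add_mem]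
      have hxl : x ∈ l := (PySem.Set.mem_ofList l x).1 hx
      exact (PySem.Set.mem_ofList (List.map g l) (g x)).2 (List.mem_map_of_mem hxl)
    · rw [pv_add_not_mem _ _ hx, List.map_append, List.map_singleton,
          pv_ofList_snoc, ih]

theorem pv_mod_succ (x n : Int) (hn : 0 < n) :
    PySem.Int.mod (PySem.Int.mod x n + 1) n = PySem.Int.mod (x + 1) n := by
  rw [PySem.Int.mod_eq_emod_of_pos hn, PySem.Int.mod_eq_emod_of_pos hn,
      PySem.Int.mod_eq_emod_of_pos hn, Int.add_emod x 1, Int.add_emod (x % n) 1,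
      Int.emod_emod_of_dvd x (dvd_refl n)]

theorem pv_norm_succ (n u v : Int) :
    (min (PySem.Int.mod (min u v + 1) n) (PySem.Int.mod (max u v + 1) n),
     max (PySem.Int.mod (min u v + 1) n) (PySem.Int.mod (max u v + 1) n)) =
    (min (PySem.Int.mod (u + 1) n) (PySem.Int.mod (v + 1) n),
     max (PySem.Int.mod (u + 1) n) (PySem.Int.mod (v + 1) n)) := by
  rcases le_total u v with h | h
  · rw [min_eq_left h, max_eq_right h]
  · rw [min_eq_right h, max_eq_left h, min_comm, max_comm]

theorem pv_step_F (n : Int) (tree : List (Int × Int)) (r : Int) (hn : 0 < n) :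
    pvRotStep n (pvF n tree r) = pvF n tree (r + 1) := by
  unfold pvRotStep pvF
  rw [pv_ofList_map_ofList, List.map_map]
  congr 1
  apply List.map_congr_left
  intro ab _
  simp only [Function.comp]
  rw [pv_norm_succ, pv_mod_succ _ _ hn, pv_mod_succ _ _ hn]
  have h1 : ab.1 + r + 1 = ab.1 + (r + 1) := by ring
  have h2 : ab.2 + r + 1 = ab.2 + (r + 1) := by ring
  rw [h1, h2]

theorem pv_fold_inv (n : Int) (tree : List (Int × Int)) (hn : 0 < n) (k : Nat) :
    ((List.range k).foldl
      (fun st _ => let nxt := pvRotStep n st.2; (st.1 ++ [nxt], nxt))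
      ([pvF n tree 0], pvF n tree 0)) =
    (pvOuts n tree (k + 1), pvF n tree (Int.ofNat k)) := by
  induction k with
  | zero => simp [pvOuts]
  | succ k ih =>
    rw [List.range_succ, List.foldl_append, ih]
    simp only [List.foldl_cons, List.foldl_nil]
    rw [pv_step_F n tree _ hn]
    unfold pvOuts
    rw [List.range_succ (n := k + 1), List.map_append]
    have : Int.ofNat k + 1 = Int.ofNat (k + 1) := by simp
    rw [this]
    rfl

-- ===== VERDICT (by name: the statement is the Claim_ definition above) =====
theorem rotated_versions_spec : Claim_equal_rotated_versions := by
  intro tree _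
  unfold Spec_rotated_versions rotated_versions rotated_versions_alt
  dsimp only
  have hn : (0 : Int) < (tree.length : Int) + 1 := by positivity
  have hcur0 : PySem.Set.ofList (tree.map (fun ab =>
      (min (PySem.Int.mod ab.1 ((tree.length : Int) + 1)) (PySem.Int.mod ab.2 ((tree.length : Int) + 1)),
       max (PySem.Int.mod ab.1 ((tree.length : Int) + 1)) (PySem.Int.mod ab.2 ((tree.length : Int) + 1))))) =
      pvF ((tree.length : Int) + 1) tree 0 := by
    unfold pvF; simp
  rw [hcur0, pv_fold_inv _ tree hn tree.length]
  rw [PySem.List.pyRange_one]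
  simp only [sub_zero]
  have hto : ((tree.length : Int) + 1).toNat = tree.length + 1 := by omega
  rw [hto, List.map_map]
  unfold pvOuts
  apply List.map_congr_left
  intro j _
  unfold pvF
  simp [Function.comp]
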